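-- pv_equiv track=rewrite | github.com/madhumini-gunaratne/bigcodearena | bigcodereward/eval_hf_data.py | _extract_execution_info
-- ===== SOURCE A (Python) =====
-- from typing import Dict, List, Tuple, Optional, Set
--
-- def _extract_execution_info(sandbox_logs: Dict) -> Tuple[str, str]:
--     """
--     Extract execution output and screenshot from sandbox logs.
--
--     Args:
--         sandbox_logs: Sandbox logs dictionary
--
--     Returns:
--         Tuple[str, str]: (execution_output, screenshot_base64)
--     """
--     output = ''
--     screenshot = ''
--
--     if not sandbox_logs:
--         return output, screenshot
--
--     # Find the latest execution result
--     for round_key in sorted(sandbox_logs.keys(), reverse=True):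
--         round_data = sandbox_logs.get(round_key)
--         if round_data and isinstance(round_data, dict):
--             sandbox_state = round_data.get('sandbox_state', {})
--             if sandbox_state:
--                 # Extract output
--                 sandbox_output = sandbox_state.get('sandbox_output', '')
--                 if sandbox_output:
--                     output = sandbox_output
--
--                 # Extract screenshot
--                 screenshot_base64 = sandbox_state.get('screenshot_base64', '')
--                 if screenshot_base64:
--                     screenshot = screenshot_base64
--
--                 # If we found valid execution results, use them
--                 if output or screenshot:
--                     break
--
--     return output, screenshot
-- ===== SOURCE B (Python) =====
-- def _extract_execution_info(sandbox_logs):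
--     """Single-pass max-scan: find the greatest round key holding usable results, no sorting."""
--     best_key = None
--     for round_key, round_data in sandbox_logs.items():
--         if round_data and isinstance(round_data, dict):
--             state = round_data.get('sandbox_state', {})
--             if state and (state.get('sandbox_output', '') or state.get('screenshot_base64', '')):
--                 if best_key is None or round_key > best_key:
--                     best_key = round_key
--     if best_key is None:
--         return '', ''
--     state = sandbox_logs[best_key].get('sandbox_state', {})
--     return state.get('sandbox_output', ''), state.get('screenshot_base64', '')
-- ===== Notes on version B (the rewrite author's own statement) =====
-- stated objective: alternative
-- what changed: Replaces reverse-sort-then-break-on-first-hit with a single unsorted pass that tracks the maximum round key whose round data holds a truthy sandbox_output or screenshot, then reads that round once.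
import Mathlib
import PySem

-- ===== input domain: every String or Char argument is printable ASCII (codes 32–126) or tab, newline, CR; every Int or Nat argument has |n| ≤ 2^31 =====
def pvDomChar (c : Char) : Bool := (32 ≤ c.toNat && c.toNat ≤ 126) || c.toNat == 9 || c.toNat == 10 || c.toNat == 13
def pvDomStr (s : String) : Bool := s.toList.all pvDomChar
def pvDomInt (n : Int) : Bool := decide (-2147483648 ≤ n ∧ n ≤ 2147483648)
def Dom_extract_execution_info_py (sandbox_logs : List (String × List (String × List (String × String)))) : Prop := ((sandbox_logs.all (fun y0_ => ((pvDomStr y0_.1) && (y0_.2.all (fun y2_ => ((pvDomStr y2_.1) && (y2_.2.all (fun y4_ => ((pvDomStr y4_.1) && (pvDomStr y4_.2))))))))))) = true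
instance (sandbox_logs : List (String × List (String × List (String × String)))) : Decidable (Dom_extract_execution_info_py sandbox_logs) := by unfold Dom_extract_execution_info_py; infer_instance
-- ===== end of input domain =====

-- B replaces A's reverse-sort + break-on-first-hit with one unsorted pass tracking the maximum
-- qualifying round key (alternative algorithm, same return value).

-- ===== PORT A =====
-- A's for-loop over sorted(keys, reverse=True) with its early `break`; state never survives an
-- iteration (output/screenshot are only kept at the breaking round), so the loop is this recursion.
def pvGoA (d : PySem.Dict String (List (String × List (String × String)))) :
    List String → String × String
  | [] => ("", "")
  | round_key :: rest =>
    let round_data := d.getD round_key []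
    if !round_data.isEmpty then
      let sandbox_state := (PySem.Dict.ofList round_data).getD "sandbox_state" []
      if !sandbox_state.isEmpty then
        let output := (PySem.Dict.ofList sandbox_state).getD "sandbox_output" ""
        let screenshot := (PySem.Dict.ofList sandbox_state).getD "screenshot_base64" ""
        if !output.toList.isEmpty || !screenshot.toList.isEmpty then (output, screenshot)
        else pvGoA d rest
      else pvGoA d rest
    else pvGoA d rest

def extract_execution_info_py (sandbox_logs : List (String × List (String × List (String × String)))) : String × String :=
  let d := PySem.Dict.ofList sandbox_logs
  if d.items.isEmpty then ("", "")
  else pvGoA d (PySem.List.sorted d.keys (fun k => k) true)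

-- ===== PORT B =====
-- does this round hold a truthy sandbox_output or screenshot_base64?
def pvQualB (round_data : List (String × List (String × String))) : Bool :=
  !round_data.isEmpty &&
    (let st := (PySem.Dict.ofList round_data).getD "sandbox_state" []
     !st.isEmpty &&
       (!((PySem.Dict.ofList st).getD "sandbox_output" "").toList.isEmpty ||
        !((PySem.Dict.ofList st).getD "screenshot_base64" "").toList.isEmpty))

-- the single pass: best_key updated as the loop runs
def pvBestB : List (String × List (String × List (String × String))) → Option String → Option String
  | [], best => best
  | (round_key, round_data) :: rest, best =>
    if pvQualB round_data then
      match best with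
      | none => pvBestB rest (some round_key)
      | some b => pvBestB rest (if b < round_key then some round_key else some b)
    else pvBestB rest best

def extract_execution_info_py_alt (sandbox_logs : List (String × List (String × List (String × String)))) : String × String :=
  let d := PySem.Dict.ofList sandbox_logs
  match pvBestB d.items none with
  | none => ("", "")
  | some best_key =>
    let st := (PySem.Dict.ofList (d.getD best_key [])).getD "sandbox_state" []
    ((PySem.Dict.ofList st).getD "sandbox_output" "",
     (PySem.Dict.ofList st).getD "screenshot_base64" "")

-- ===== PRECONDITION & SPEC =====
def Spec_extract_execution_info_py (sandbox_logs : List (String × List (String × List (String × String)))) (out : String × String) : Prop := out = extract_execution_info_py_alt sandbox_logs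
instance (sandbox_logs : List (String × List (String × List (String × String)))) (out : String × String) : Decidable (Spec_extract_execution_info_py sandbox_logs out) := by unfold Spec_extract_execution_info_py; infer_instance

-- ===== CLAIM (what is proved, stated in full; the proofs are below) =====
def Claim_equal_extract_execution_info_py : Prop := ∀ (sandbox_logs : List (String × List (String × List (String × String)))), Dom_extract_execution_info_py sandbox_logs → Spec_extract_execution_info_py sandbox_logs (extract_execution_info_py sandbox_logs)

-- ===== LEMMAS AND PROOFS =====

-- the per-key predicate and result A's loop effectively computes
def pvQ (d : PySem.Dict String (List (String × List (String × String)))) (k : String) : Bool :=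
  pvQualB (d.getD k [])

def pvRes (d : PySem.Dict String (List (String × List (String × String)))) (k : String) : String × String :=
  let st := (PySem.Dict.ofList (d.getD k [])).getD "sandbox_state" []
  ((PySem.Dict.ofList st).getD "sandbox_output" "",
   (PySem.Dict.ofList st).getD "screenshot_base64" "")

lemma goA_eq_find (d : PySem.Dict String (List (String × List (String × String)))) (l : List String) :
    pvGoA d l = (match l.find? (pvQ d) with
      | none => ("", "")
      | some k => pvRes d k) := by
  induction l with
  | nil => simp [pvGoA]
  | cons k rest ih =>
    by_cases h1 : (d.getD k []).isEmpty = true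
    · have hq : pvQ d k = false := by simp [pvQ, pvQualB, h1]
      simp [pvGoA, h1, hq, ih]
    · by_cases h2 : ((PySem.Dict.ofList (d.getD k [])).getD "sandbox_state" []).isEmpty = true
      · have hq : pvQ d k = false := by simp [pvQ, pvQualB, h1, h2]
        simp [pvGoA, h1, h2, hq, ih]
      · by_cases h3 : (!((PySem.Dict.ofList ((PySem.Dict.ofList (d.getD k [])).getD "sandbox_state" [])).getD "sandbox_output" "").toList.isEmpty
            || !((PySem.Dict.ofList ((PySem.Dict.ofList (d.getD k [])).getD "sandbox_state" [])).getD "screenshot_base64" "").toList.isEmpty) = true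
        · have hq : pvQ d k = true := by simp [pvQ, pvQualB, h1, h2]; simpa using h3
          simp [pvGoA, h1, h2, h3, hq, pvRes]
        · have hq : pvQ d k = false := by
            simp [pvQ, pvQualB, h1, h2]
            simpa using h3
          simp [pvGoA, h1, h2, h3, hq, ih]

lemma bestB_cons_pos_none (a : String) (v : List (String × List (String × String)))
    (rest : List (String × List (String × List (String × String)))) (hq : pvQualB v = true) :
    pvBestB ((a, v) :: rest) none = pvBestB rest (some a) := by
  simp [pvBestB, hq]

lemma bestB_cons_pos_some (a : String) (v : List (String × List (String × String)))
    (rest : List (String × List (String × List (String × String)))) (hq : pvQualB v = true)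
    (b : String) :
    pvBestB ((a, v) :: rest) (some b) = pvBestB rest (if b < a then some a else some b) := by
  simp [pvBestB, hq]

lemma bestB_cons_neg (a : String) (v : List (String × List (String × String)))
    (rest : List (String × List (String × List (String × String)))) (hq : pvQualB v = false)
    (acc : Option String) :
    pvBestB ((a, v) :: rest) acc = pvBestB rest acc := by
  cases acc <;> simp [pvBestB, hq]

lemma bestB_none (l : List (String × List (String × List (String × String)))) :
    ∀ acc, pvBestB l acc = none ↔ acc = none ∧ ∀ p ∈ l, pvQualB p.2 = false := by
  induction l with
  | nil => intro acc; simp [pvBestB]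
  | cons q rest ih =>
    intro acc
    obtain ⟨a, v⟩ := q
    by_cases hq : pvQualB v = true
    · have hne : ∀ b : String, pvBestB rest (some b) ≠ none := fun b hzero =>
        absurd ((ih (some b)).1 hzero).1 (by simp)
      constructor
      · intro h
        exfalso
        cases acc with
        | none =>
          rw [bestB_cons_pos_none a v rest hq] at h
          exact hne a h
        | some b =>
          rw [bestB_cons_pos_some a v rest hq b] at h
          by_cases hba : b < a
          · rw [if_pos hba] at h; exact hne a h
          · rw [if_neg hba] at h; exact hne b h
      · rintro ⟨-, hall⟩
        exact absurd (hall (a, v) (by simp)) (by simp [hq])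
    · simp at hq
      rw [bestB_cons_neg a v rest hq acc, ih acc]
      constructor
      · rintro ⟨h1, h2⟩
        refine ⟨h1, ?_⟩
        intro p hp
        rcases List.mem_cons.1 hp with rfl | hp
        · exact hq
        · exact h2 p hp
      · rintro ⟨h1, h2⟩
        exact ⟨h1, fun p hp => h2 p (List.mem_cons_of_mem _ hp)⟩

lemma bestB_acc_le (rest : List (String × List (String × List (String × String)))) :
    ∀ b k, pvBestB rest (some b) = some k → b ≤ k := by
  induction rest with
  | nil =>
    intro b k h
    exact le_of_eq (Option.some.inj h)
  | cons q rest ih =>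
    intro b k h
    obtain ⟨a, v⟩ := q
    by_cases hq : pvQualB v = true
    · rw [bestB_cons_pos_some a v rest hq b] at h
      by_cases hba : b < a
      · rw [if_pos hba] at h
        exact le_of_lt (lt_of_lt_of_le hba (ih a k h))
      · rw [if_neg hba] at h
        exact ih b k h
    · simp at hq
      rw [bestB_cons_neg a v rest hq (some b)] at h
      exact ih b k h

lemma bestB_le (l : List (String × List (String × List (String × String)))) :
    ∀ acc k, pvBestB l acc = some k → ∀ p ∈ l, pvQualB p.2 = true → p.1 ≤ k := by
  induction l with
  | nil => intro acc k _ p hp; simp at hp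
  | cons q rest ih =>
    intro acc k h p hp hqp
    obtain ⟨a, v⟩ := q
    rcases List.mem_cons.1 hp with rfl | hpr
    · have hq : pvQualB v = true := hqp
      show a ≤ k
      cases acc with
      | none =>
        rw [bestB_cons_pos_none a v rest hq] at h
        exact bestB_acc_le rest a k h
      | some b =>
        rw [bestB_cons_pos_some a v rest hq b] at h
        by_cases hba : b < a
        · rw [if_pos hba] at h
          exact bestB_acc_le rest a k h
        · rw [if_neg hba] at h
          exact le_trans (not_lt.1 hba) (bestB_acc_le rest b k h)
    · by_cases hq : pvQualB v = true
      · cases acc with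
        | none =>
          rw [bestB_cons_pos_none a v rest hq] at h
          exact ih _ k h p hpr hqp
        | some b =>
          rw [bestB_cons_pos_some a v rest hq b] at h
          exact ih _ k h p hpr hqp
      · simp at hq
        rw [bestB_cons_neg a v rest hq acc] at h
        exact ih acc k h p hpr hqp

lemma bestB_some_mem (l : List (String × List (String × List (String × String)))) :
    ∀ acc k, pvBestB l acc = some k → acc = some k ∨ ∃ v, (k, v) ∈ l ∧ pvQualB v = true := by
  induction l with
  | nil =>
    intro acc k h
    left
    simpa [pvBestB] using h
  | cons q rest ih =>
    intro acc k h
    obtain ⟨a, v⟩ := q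
    by_cases hq : pvQualB v = true
    · cases acc with
      | none =>
        rw [bestB_cons_pos_none a v rest hq] at h
        rcases ih (some a) k h with ha | ⟨w, hw, hqw⟩
        · right
          obtain rfl : a = k := Option.some.inj ha
          exact ⟨v, by simp, hq⟩
        · right; exact ⟨w, List.mem_cons_of_mem _ hw, hqw⟩
      | some b =>
        rw [bestB_cons_pos_some a v rest hq b] at h
        by_cases hba : b < a
        · rw [if_pos hba] at h
          rcases ih (some a) k h with ha | ⟨w, hw, hqw⟩
          · right
            obtain rfl : a = k := Option.some.inj ha
            exact ⟨v, by simp, hq⟩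
          · right; exact ⟨w, List.mem_cons_of_mem _ hw, hqw⟩
        · rw [if_neg hba] at h
          rcases ih (some b) k h with hb | ⟨w, hw, hqw⟩
          · left; exact hb
          · right; exact ⟨w, List.mem_cons_of_mem _ hw, hqw⟩
    · simp at hq
      rw [bestB_cons_neg a v rest hq acc] at h
      rcases ih acc k h with hb | ⟨w, hw, hqw⟩
      · left; exact hb
      · right; exact ⟨w, List.mem_cons_of_mem _ hw, hqw⟩

lemma find?_desc_max (q : String → Bool) :
    ∀ (s : List String), s.Pairwise (fun a b : String => b ≤ a) →
      ∀ k, s.find? q = some k → ∀ j ∈ s, q j = true → j ≤ k := by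
  intro s
  induction s with
  | nil => intro _ k h; simp at h
  | cons a t ih =>
    intro hp k hf j hj hqj
    rcases List.pairwise_cons.1 hp with ⟨ha, ht⟩
    by_cases hqa : q a = true
    · rw [List.find?_cons_of_pos hqa] at hf
      cases hf
      rcases List.mem_cons.1 hj with rfl | hjt
      · exact le_refl _
      · exact ha j hjt
    · rw [List.find?_cons_of_neg (by simpa using hqa)] at hf
      rcases List.mem_cons.1 hj with rfl | hjt
      · exact absurd hqj hqa
      · exact ih ht k hf j hjt hqj

-- key correspondence: q over sorted keys picks the same round as the single-pass max
lemma find_eq_best (d : PySem.Dict String (List (String × List (String × String))))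
    (hn : d.keys.Nodup) :
    (PySem.List.sorted d.keys (fun k => k) true).find? (pvQ d) = pvBestB d.items none := by
  have hkeys : d.keys = d.items.map Prod.fst := rfl
  have hperm := PySem.List.sorted_perm d.keys (fun k => k) true
  have hmem : ∀ k : String, k ∈ PySem.List.sorted d.keys (fun k => k) true ↔ k ∈ d.keys :=
    fun k => hperm.mem_iff
  have hqv : ∀ (k : String) (v : List (String × List (String × String))),
      (k, v) ∈ d.items → pvQ d k = pvQualB v := by
    intro k v hkv
    unfold pvQ
    rw [PySem.Dict.getD_of_mem_items d hkv hn]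
  cases hB : pvBestB d.items none with
  | none =>
    have hall := (bestB_none d.items none).1 hB
    apply List.find?_eq_none.2
    intro k hk
    rcases List.mem_map.1 (hkeys ▸ (hmem k).1 hk) with ⟨p, hp, hpk⟩
    have := hall.2 p hp
    simp [pvQ] at *
    rw [← hpk] at *
    rw [hqv p.1 p.2 hp]
    simp_all
  | some k2 =>
    rcases bestB_some_mem d.items none k2 hB with h | ⟨v2, hv2, hqv2⟩
    · exact absurd h (by simp)
    have hq2 : pvQ d k2 = true := by rw [hqv k2 v2 hv2]; exact hqv2
    have hk2s : k2 ∈ PySem.List.sorted d.keys (fun k => k) true := by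
      rw [hmem, hkeys]
      exact List.mem_map.2 ⟨(k2, v2), hv2, rfl⟩
    cases hF : (PySem.List.sorted d.keys (fun k => k) true).find? (pvQ d) with
    | none =>
      exact absurd hq2 (by simpa using List.find?_eq_none.1 hF k2 hk2s)
    | some k1 =>
      have hq1 : pvQ d k1 = true := List.find?_some hF
      have hk1s : k1 ∈ PySem.List.sorted d.keys (fun k => k) true := List.mem_of_find?_eq_some hF
      rcases List.mem_map.1 (hkeys ▸ (hmem k1).1 hk1s) with ⟨p1, hp1, hpk1⟩
      have hq1v : pvQualB p1.2 = true := by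
        rw [← hqv p1.1 p1.2 hp1, hpk1]; exact hq1
      have h12 : k1 ≤ k2 := by
        have := bestB_le d.items none k2 hB p1 hp1 hq1v
        rwa [hpk1] at this
      have h21 : k2 ≤ k1 := by
        have hpw : (PySem.List.sorted d.keys (fun k => k) true).Pairwise
            (fun a b : String => b ≤ a) := PySem.List.sorted_pairwise_rev d.keys (fun k => k)
        exact find?_desc_max (pvQ d) _ hpw k1 hF k2 hk2s hq2
      rw [le_antisymm h12 h21]

-- ===== VERDICT (by name: the statement is the Claim_ definition above) =====
theorem extract_execution_info_py_spec : Claim_equal_extract_execution_info_py := by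
  intro logs _
  unfold Spec_extract_execution_info_py
  unfold extract_execution_info_py extract_execution_info_py_alt
  simp only []
  set d := PySem.Dict.ofList logs with hd
  have hn : d.keys.Nodup := PySem.Dict.nodup_keys_ofList logs
  by_cases hE : d.items.isEmpty = true
  · have : d.items = [] := List.isEmpty_iff.1 hE
    simp [this, pvBestB]
  · rw [goA_eq_find, find_eq_best d hn]
    simp [hE]
    cases pvBestB d.items none with
    | none => rfl
    | some k => rfl
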